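-- pv_equiv track=rewrite | github.com/Karan-Harale/Programming-Languages | Python/sherlocknum.py | count
-- ===== SOURCE A (Python) =====
-- def count(N):
--     summ=0
--     counts=0
--     for i in range(N):
--         summ+=1
--         if (summ%2==0):
--             counts+=1
--     return counts
-- ===== SOURCE B (Python) =====
-- def count(N):
--     # closed form: among 1..N, the even partial sums are exactly the even numbers
--     return max(N, 0) // 2
-- ===== Notes on version B (the rewrite author's own statement) =====
-- stated objective: faster
-- what changed: Replaced the O(N) accumulation loop with the closed form max(N,0)//2.
import Mathlib
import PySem

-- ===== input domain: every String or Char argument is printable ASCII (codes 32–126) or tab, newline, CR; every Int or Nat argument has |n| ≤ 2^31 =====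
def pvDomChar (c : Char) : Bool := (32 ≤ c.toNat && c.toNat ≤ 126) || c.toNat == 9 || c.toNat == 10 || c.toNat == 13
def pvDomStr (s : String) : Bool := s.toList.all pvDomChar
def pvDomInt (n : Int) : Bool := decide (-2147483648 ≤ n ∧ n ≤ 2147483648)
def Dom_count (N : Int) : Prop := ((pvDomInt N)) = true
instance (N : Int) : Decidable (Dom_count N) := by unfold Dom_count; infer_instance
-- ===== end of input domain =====

-- B replaces A's O(N) accumulation loop by the closed form max(N,0)//2 (same value for every N).

-- ===== PORT A =====
def count (N : Int) : Int :=
  ((PySem.List.pyRange 0 N 1).foldl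
    (fun (st : Int × Int) _ =>
      let summ := st.1 + 1
      (summ, if PySem.Int.mod summ 2 = 0 then st.2 + 1 else st.2))
    (0, 0)).2

-- ===== PORT B =====
def count_alt (N : Int) : Int := PySem.Int.floordiv (max N 0) 2

-- ===== PRECONDITION & SPEC =====
def Spec_count (N : Int) (out : Int) : Prop := out = count_alt N
instance (N : Int) (out : Int) : Decidable (Spec_count N out) := by unfold Spec_count; infer_instance

-- ===== CLAIM (what is proved, stated in full; the proofs are below) =====
def Claim_equal_count : Prop := ∀ (N : Int), Dom_count N → Spec_count N (count N)

-- ===== LEMMAS AND PROOFS =====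

def pvStep (st : Int × Int) (_x : Int) : Int × Int :=
  let summ := st.1 + 1
  (summ, if PySem.Int.mod summ 2 = 0 then st.2 + 1 else st.2)

theorem pvLoop (n : Nat) :
    (PySem.List.pyRange 0 (n : Int) 1).foldl pvStep (0, 0) = ((n : Int), (n : Int) / 2) := by
  induction n with
  | zero => simp
  | succ k ih =>
      have h : ((k : Int) + 1) = ((k + 1 : Nat) : Int) := by push_cast; ring
      rw [show ((k + 1 : Nat) : Int) = (k : Int) + 1 by push_cast; ring,
        PySem.List.pyRange_one_succ_right (by positivity), List.foldl_append, ih]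
      simp only [List.foldl, pvStep]
      rw [PySem.Int.mod_eq_emod_of_pos (by norm_num)]
      split_ifs with hm
      · refine Prod.ext rfl ?_
        simp only
        omega
      · refine Prod.ext rfl ?_
        simp only
        omega

-- ===== VERDICT (by name: the statement is the Claim_ definition above) =====
theorem count_spec : Claim_equal_count := by
  intro N _
  unfold Spec_count count count_alt
  by_cases h : N ≤ 0
  · rw [PySem.List.pyRange_one_eq_nil h]
    have : max N 0 = 0 := by omega
    simp [this, PySem.Int.floordiv]
  · obtain ⟨n, rfl⟩ : ∃ n : Nat, N = (n : Int) := ⟨N.toNat, by omega⟩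
    have := pvLoop n
    rw [show (PySem.List.pyRange 0 (n : Int) 1).foldl
        (fun (st : Int × Int) _ =>
          let summ := st.1 + 1
          (summ, if PySem.Int.mod summ 2 = 0 then st.2 + 1 else st.2)) (0, 0)
        = (PySem.List.pyRange 0 (n : Int) 1).foldl pvStep (0, 0) from rfl, this]
    have hmax : max (n : Int) 0 = (n : Int) := by omega
    rw [hmax, PySem.Int.floordiv_eq_ediv_of_pos (by norm_num)]
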